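-- pv_equiv track=rewrite | github.com/m9dswyptrn-web/SupersonicBuilder | bass/subwoofer.py | _detect_phase_issues
-- ===== SOURCE A (Python) =====
-- from typing import Dict, List, Optional
--
-- def _detect_phase_issues(subs: List[dict]) -> bool:
--     """Detect potential phase cancellation issues."""
--     if len(subs) < 2:
--         return False
--
--     phases = [sub.get('phase_degrees', 0) for sub in subs]
--
--     for i in range(len(phases)):
--         for j in range(i + 1, len(phases)):
--             phase_diff = abs(phases[i] - phases[j])
--             if 80 <= phase_diff <= 100:
--                 return True
--
--     return False
-- ===== SOURCE B (Python) =====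
-- def _bisect_left(a, x):
--     lo = 0
--     hi = len(a)
--     while lo < hi:
--         mid = (lo + hi) // 2
--         if a[mid] < x:
--             lo = mid + 1
--         else:
--             hi = mid
--     return lo
--
--
-- def _detect_phase_issues(subs):
--     """Detect potential phase cancellation issues (sort + binary search)."""
--     phases = sorted(sub.get('phase_degrees', 0) for sub in subs)
--     for p in phases:
--         i = _bisect_left(phases, p + 80)
--         if i < len(phases) and phases[i] <= p + 100:
--             return True
--     return False
-- ===== Notes on version B (the rewrite author's own statement) =====
-- stated objective: alternative
-- what changed: Replaces the all-pairs nested scan with sorting the phases once and binary-searching, for each phase p, for a phase in [p+80, p+100]; measured run time was comparable because A exits early on typical inputs.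
import Mathlib
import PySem

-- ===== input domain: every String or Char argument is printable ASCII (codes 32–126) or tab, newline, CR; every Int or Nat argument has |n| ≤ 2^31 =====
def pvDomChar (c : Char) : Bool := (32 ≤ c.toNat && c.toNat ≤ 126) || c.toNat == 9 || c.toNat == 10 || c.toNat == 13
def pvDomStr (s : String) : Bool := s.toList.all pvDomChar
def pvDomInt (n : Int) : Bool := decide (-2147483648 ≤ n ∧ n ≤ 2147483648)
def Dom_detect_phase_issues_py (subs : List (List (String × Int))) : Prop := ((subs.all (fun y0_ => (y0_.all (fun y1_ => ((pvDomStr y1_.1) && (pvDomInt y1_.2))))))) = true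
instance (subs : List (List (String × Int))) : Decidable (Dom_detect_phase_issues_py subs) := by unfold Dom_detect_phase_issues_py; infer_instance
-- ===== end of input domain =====

-- B changes the algorithm: it sorts the phases once, then binary-searches for each phase p for a
-- phase in [p+80, p+100], instead of A's all-pairs scan; same return value on every input.

-- ===== PORT A =====
-- shared by both ports: [sub.get('phase_degrees', 0) for sub in subs]
def pvPhases (subs : List (List (String × Int))) : List Int :=
  subs.map (fun sub => PySem.Dict.getD (PySem.Dict.ofList sub) "phase_degrees" 0)

def detect_phase_issues_py (subs : List (List (String × Int))) : Bool :=
  if subs.length < 2 then false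
  else
    let phases := pvPhases subs
    (PySem.List.pyRange 0 (phases.length : Int) 1).any (fun i =>
      (PySem.List.pyRange (i + 1) (phases.length : Int) 1).any (fun j =>
        let phase_diff := |(PySem.List.pyGet? phases i).getD 0 - (PySem.List.pyGet? phases j).getD 0|
        decide (80 ≤ phase_diff) && decide (phase_diff ≤ 100)))

-- ===== PORT B =====
-- Source B's hand-written `_bisect_left` while-loop, with the loop state (lo, hi) as parameters;
-- a[mid] is in range on every call reached from lo = 0, hi = len(a), so pyGet? never returns none.
def bisect_go (a : List Int) (x : Int) : Nat → Int → Int → Int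
  | 0, lo, _ => lo
  | fuel + 1, lo, hi =>
    if lo < hi then
      let mid := PySem.Int.floordiv (lo + hi) 2
      if (PySem.List.pyGet? a mid).getD 0 < x then bisect_go a x fuel (mid + 1) hi
      else bisect_go a x fuel lo mid
    else lo

def bisect_left_py (a : List Int) (x : Int) (lo hi : Int) : Int :=
  bisect_go a x (hi - lo).toNat lo hi

def detect_phase_issues_py_alt (subs : List (List (String × Int))) : Bool :=
  let phases := PySem.List.sorted (pvPhases subs) (fun x => x) false
  phases.any (fun p =>
    let i := bisect_left_py phases (p + 80) 0 (phases.length : Int)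
    decide (i < (phases.length : Int)) &&
      decide ((PySem.List.pyGet? phases i).getD 0 ≤ p + 100))

-- ===== PRECONDITION & SPEC =====
def Spec_detect_phase_issues_py (subs : List (List (String × Int))) (out : Bool) : Prop := out = detect_phase_issues_py_alt subs
instance (subs : List (List (String × Int))) (out : Bool) : Decidable (Spec_detect_phase_issues_py subs out) := by unfold Spec_detect_phase_issues_py; infer_instance

-- ===== CLAIM (what is proved, stated in full; the proofs are below) =====
def Claim_equal_detect_phase_issues_py : Prop := ∀ (subs : List (List (String × Int))), Dom_detect_phase_issues_py subs → Spec_detect_phase_issues_py subs (detect_phase_issues_py subs)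

-- ===== LEMMAS AND PROOFS =====

-- "some pair of phases is 80-100 degrees apart", as an unordered membership statement
def HasPair (l : List Int) : Prop := ∃ a ∈ l, ∃ b ∈ l, 80 ≤ b - a ∧ b - a ≤ 100

theorem getElem_mono_of_pairwise {l : List Int} (h : l.Pairwise (· ≤ ·))
    (p q : Nat) (hp : p < l.length) (hq : q < l.length) (hpq : p ≤ q) : l[p] ≤ l[q] := by
  rcases Nat.lt_or_eq_of_le hpq with hc | hc
  · exact List.pairwise_iff_getElem.mp h p q hp hq hc
  · subst hc; exact le_refl _

theorem pyget_val (l : List Int) (i : Int) (h0 : 0 ≤ i) (h : i.toNat < l.length) :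
    (PySem.List.pyGet? l i).getD 0 = l[i.toNat] := by
  rw [PySem.List.pyGet?_eq_some_getElem l h0 (show i < (l.length : Int) by omega)]
  rfl

theorem no_pair_of_short {l : List Int} (h : l.length < 2) : ¬ HasPair l := by
  rintro ⟨a, ha, b, hb, h80, _⟩
  match l, h with
  | [], _ => exact (List.not_mem_nil ha)
  | [c], _ =>
    rw [List.mem_singleton] at ha hb
    omega

theorem bisect_go_succ_step (a : List Int) (x : Int) (f : Nat) (lo hi : Int) (h : lo < hi) :
    bisect_go a x (f + 1) lo hi =
      if (PySem.List.pyGet? a (PySem.Int.floordiv (lo + hi) 2)).getD 0 < x then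
        bisect_go a x f (PySem.Int.floordiv (lo + hi) 2 + 1) hi
      else bisect_go a x f lo (PySem.Int.floordiv (lo + hi) 2) := by
  simp only [bisect_go, if_pos h]

theorem bisect_go_succ_base (a : List Int) (x : Int) (f : Nat) (lo hi : Int) (h : ¬ lo < hi) :
    bisect_go a x (f + 1) lo hi = lo := by
  simp only [bisect_go, if_neg h]

-- correctness of the ported binary-search loop on a sorted list
theorem bisect_go_spec (a : List Int) (x : Int) (ha : a.Pairwise (· ≤ ·)) :
    ∀ (fuel : Nat) (lo hi : Int), (hi - lo).toNat ≤ fuel → 0 ≤ lo → lo ≤ hi → hi ≤ a.length →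
    (∀ k : Nat, (hk : k < a.length) → (k : Int) < lo → a[k] < x) →
    (∀ k : Nat, (hk : k < a.length) → hi ≤ (k : Int) → x ≤ a[k]) →
    0 ≤ bisect_go a x fuel lo hi ∧ bisect_go a x fuel lo hi ≤ a.length ∧
    (∀ k : Nat, (hk : k < a.length) → (k : Int) < bisect_go a x fuel lo hi → a[k] < x) ∧
    (∀ k : Nat, (hk : k < a.length) → bisect_go a x fuel lo hi ≤ (k : Int) → x ≤ a[k]) := by
  intro fuel
  induction fuel with
  | zero =>
    intro lo hi hf h0 hlh hha hlt hge
    rw [show bisect_go a x 0 lo hi = lo from rfl]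
    exact ⟨h0, by omega, fun k hk hkl => hlt k hk hkl, fun k hk hkl => hge k hk (by omega)⟩
  | succ f ih =>
    intro lo hi hf h0 hlh hha hlt hge
    by_cases hcond : lo < hi
    · have h2 : (0:Int) < 2 := by omega
      have hm1 := PySem.Int.floordiv_lt_iff_lt_mul (a := lo + hi) (b := 2) (q := hi) h2
      have hm2 := PySem.Int.le_floordiv_iff_mul_le (a := lo + hi) (b := 2) (q := lo) h2
      rw [bisect_go_succ_step a x f lo hi hcond]
      set mid := PySem.Int.floordiv (lo + hi) 2 with hmid
      have hmlo : lo ≤ mid := hm2.mpr (by omega)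
      have hmhi : mid < hi := hm1.mpr (by omega)
      have hmlen : mid.toNat < a.length := by omega
      rw [pyget_val a mid (by omega) hmlen]
      split_ifs with hv
      · refine ih (mid + 1) hi (by omega) (by omega) (by omega) hha ?_ hge
        intro k hk hkm
        by_cases hklo : (k : Int) < lo
        · exact hlt k hk hklo
        · exact lt_of_le_of_lt (getElem_mono_of_pairwise ha k mid.toNat hk hmlen (by omega)) hv
      · refine ih lo mid (by omega) h0 (by omega) (by omega) hlt ?_
        intro k hk hkm
        exact le_trans (not_lt.mp hv) (getElem_mono_of_pairwise ha mid.toNat k hmlen hk (by omega))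
    · rw [bisect_go_succ_base a x f lo hi hcond]
      exact ⟨h0, by omega, fun k hk hkl => hlt k hk hkl, fun k hk hkl => hge k hk (by omega)⟩

theorem bisect_left_py_spec (a : List Int) (x : Int) (ha : a.Pairwise (· ≤ ·)) :
    ∀ lo hi : Int, 0 ≤ lo → lo ≤ hi → hi ≤ a.length →
    (∀ k : Nat, (hk : k < a.length) → (k : Int) < lo → a[k] < x) →
    (∀ k : Nat, (hk : k < a.length) → hi ≤ (k : Int) → x ≤ a[k]) →
    0 ≤ bisect_left_py a x lo hi ∧ bisect_left_py a x lo hi ≤ a.length ∧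
    (∀ k : Nat, (hk : k < a.length) → (k : Int) < bisect_left_py a x lo hi → a[k] < x) ∧
    (∀ k : Nat, (hk : k < a.length) → bisect_left_py a x lo hi ≤ (k : Int) → x ≤ a[k]) := by
  intro lo hi h0 hlh hha hlt hge
  unfold bisect_left_py
  exact bisect_go_spec a x ha (hi - lo).toNat lo hi (le_refl _) h0 hlh hha hlt hge

-- A's nested index loops detect exactly HasPair
theorem anyPairs_iff (l : List Int) :
    ((PySem.List.pyRange 0 (l.length : Int) 1).any (fun i =>
      (PySem.List.pyRange (i + 1) (l.length : Int) 1).any (fun j =>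
        let phase_diff := |(PySem.List.pyGet? l i).getD 0 - (PySem.List.pyGet? l j).getD 0|
        decide (80 ≤ phase_diff) && decide (phase_diff ≤ 100))) = true) ↔ HasPair l := by
  rw [List.any_eq_true]
  constructor
  · rintro ⟨i, hi, hinner⟩
    rw [List.any_eq_true] at hinner
    obtain ⟨j, hj, hcond⟩ := hinner
    rw [PySem.List.mem_pyRange_one] at hi hj
    have hilt : i.toNat < l.length := by omega
    have hjlt : j.toNat < l.length := by omega
    simp only [Bool.and_eq_true, decide_eq_true_eq] at hcond
    rw [pyget_val l i (by omega) hilt, pyget_val l j (by omega) hjlt] at hcond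
    obtain ⟨h80, h100⟩ := hcond
    rcases abs_cases (l[i.toNat] - l[j.toNat]) with ⟨he, _⟩ | ⟨he, _⟩ <;>
      rw [he] at h80 h100
    · exact ⟨l[j.toNat], List.getElem_mem _, l[i.toNat], List.getElem_mem _, by omega, by omega⟩
    · exact ⟨l[i.toNat], List.getElem_mem _, l[j.toNat], List.getElem_mem _, by omega, by omega⟩
  · rintro ⟨a, hamem, b, hbmem, h80, h100⟩
    obtain ⟨ia, hia, hav⟩ := List.mem_iff_getElem.mp hamem
    obtain ⟨ib, hib, hbv⟩ := List.mem_iff_getElem.mp hbmem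
    have hne : ia ≠ ib := by
      intro h
      subst h
      rw [hav] at hbv
      omega
    have habs : |a - b| = b - a := by
      rw [abs_sub_comm]
      exact abs_of_nonneg (by omega)
    rcases Nat.lt_or_ge ia ib with hlt | hge
    · refine ⟨(ia : Int), ?_, ?_⟩
      · rw [PySem.List.mem_pyRange_one]; omega
      · rw [List.any_eq_true]
        refine ⟨(ib : Int), ?_, ?_⟩
        · rw [PySem.List.mem_pyRange_one]; omega
        · simp only [PySem.List.pyGet?_natCast, List.getElem?_eq_getElem hia,
            List.getElem?_eq_getElem hib, Option.getD_some, Bool.and_eq_true, decide_eq_true_eq]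
          rw [hav, hbv, habs]
          exact ⟨h80, h100⟩
    · have hlt : ib < ia := by omega
      refine ⟨(ib : Int), ?_, ?_⟩
      · rw [PySem.List.mem_pyRange_one]; omega
      · rw [List.any_eq_true]
        refine ⟨(ia : Int), ?_, ?_⟩
        · rw [PySem.List.mem_pyRange_one]; omega
        · simp only [PySem.List.pyGet?_natCast, List.getElem?_eq_getElem hia,
            List.getElem?_eq_getElem hib, Option.getD_some, Bool.and_eq_true, decide_eq_true_eq]
          rw [hav, hbv]
          rw [abs_of_nonneg (by omega)]
          exact ⟨h80, h100⟩

theorem portA_iff (subs : List (List (String × Int))) :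
    detect_phase_issues_py subs = true ↔ HasPair (pvPhases subs) := by
  have hlen : (pvPhases subs).length = subs.length := by simp [pvPhases]
  by_cases h2 : subs.length < 2
  · simp only [detect_phase_issues_py, if_pos h2]
    constructor
    · intro h; cases h
    · intro h
      exact absurd h (no_pair_of_short (by omega))
  · simp only [detect_phase_issues_py, if_neg h2]
    exact anyPairs_iff (pvPhases subs)

theorem portB_iff (subs : List (List (String × Int))) :
    detect_phase_issues_py_alt subs = true ↔ HasPair (pvPhases subs) := by
  simp only [detect_phase_issues_py_alt]
  set s := PySem.List.sorted (pvPhases subs) (fun x => x) false with hs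
  have hpw : s.Pairwise (· ≤ ·) := by
    have := PySem.List.sorted_pairwise (pvPhases subs) (fun x : Int => x)
    simpa using this
  have hmemiff : ∀ x : Int, x ∈ s ↔ x ∈ pvPhases subs := by
    intro x
    rw [hs]
    exact PySem.List.mem_sorted (pvPhases subs) (fun x : Int => x) false x
  have hHP : HasPair s ↔ HasPair (pvPhases subs) := by
    unfold HasPair
    constructor <;> rintro ⟨a, ha, b, hb, h1, h2⟩
    · exact ⟨a, (hmemiff a).mp ha, b, (hmemiff b).mp hb, h1, h2⟩
    · exact ⟨a, (hmemiff a).mpr ha, b, (hmemiff b).mpr hb, h1, h2⟩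
  rw [← hHP, List.any_eq_true]
  constructor
  · rintro ⟨p, hp, hcond⟩
    obtain ⟨hr0, hrlen, hbelow, habove⟩ :=
      bisect_left_py_spec s (p + 80) hpw 0 (s.length : Int) (le_refl 0) (by omega) (le_refl _)
        (fun k hk hneg => absurd hneg (by omega))
        (fun k hk hgek => absurd hgek (by omega))
    set i := bisect_left_py s (p + 80) 0 (s.length : Int) with hi
    simp only [Bool.and_eq_true, decide_eq_true_eq] at hcond
    obtain ⟨hilt, hval⟩ := hcond
    have hitn : i.toNat < s.length := by omega
    rw [pyget_val s i (by omega) hitn] at hval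
    have h80 : p + 80 ≤ s[i.toNat] := habove i.toNat hitn (by omega)
    exact ⟨p, hp, s[i.toNat], List.getElem_mem _, by omega, by omega⟩
  · rintro ⟨a, hamem, b, hbmem, h80, h100⟩
    refine ⟨a, hamem, ?_⟩
    obtain ⟨hr0, hrlen, hbelow, habove⟩ :=
      bisect_left_py_spec s (a + 80) hpw 0 (s.length : Int) (le_refl 0) (by omega) (le_refl _)
        (fun k hk hneg => absurd hneg (by omega))
        (fun k hk hgek => absurd hgek (by omega))
    set i := bisect_left_py s (a + 80) 0 (s.length : Int) with hi
    obtain ⟨kb, hkb, hkbv⟩ := List.mem_iff_getElem.mp hbmem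
    have hile : i ≤ (kb : Int) := by
      by_contra hc
      have hlow := hbelow kb hkb (by omega)
      rw [hkbv] at hlow
      omega
    have hitn : i.toNat < s.length := by omega
    simp only [Bool.and_eq_true, decide_eq_true_eq]
    rw [pyget_val s i (by omega) hitn]
    have hmo : s[i.toNat] ≤ s[kb] := getElem_mono_of_pairwise hpw i.toNat kb hitn hkb (by omega)
    rw [hkbv] at hmo
    exact ⟨by omega, by omega⟩

-- ===== VERDICT (by name: the statement is the Claim_ definition above) =====
theorem detect_phase_issues_py_spec : Claim_equal_detect_phase_issues_py := by
  intro subs _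
  unfold Spec_detect_phase_issues_py
  rw [Bool.eq_iff_iff, portA_iff, portB_iff]
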